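-- pv_equiv track=rewrite | github.com/Herboze/algo_clone | lab1/task8/src/Solution.py | function
-- ===== SOURCE A (Python) =====
-- def function(n: int, a: list[int]) -> str:
--     res = []
--     result = []
--
--     for _ in range(n):
--         minimum = 10 ** 10
--         index = -1
--
--         for i, v in enumerate(a):
--             if minimum > v:
--                 minimum = v
--                 index = i
--
--         a[index], a[len(res)] = a[len(res)], 10 ** 10
--         res.append(index)
--
--     for i, x in enumerate(res):
--         if i != x:
--             result.append(f"Swap elements at indices {1 + min(x, i)} and {1 + max(x, i)}.\n")
--     result.append("No more swaps needed.")
--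
--     return ''.join(result)
-- ===== SOURCE B (Python) =====
-- # B: shrinking-list selection simulation: pop the front, place it at the first-minimum
-- # slot, emit each swap line immediately — no sentinel values, no index list, no second pass.
-- # (A mutates its argument list `a` in place; B does not — equivalence is about the return value.)
-- def function(n: int, a: list[int]) -> str:
--     tail = list(a)
--     parts = []
--     for k in range(n):
--         j = tail.index(min(tail))
--         head = tail.pop(0)
--         if j:
--             tail[j - 1] = head
--             parts.append(f"Swap elements at indices {k + 1} and {k + j + 1}.\n")
--     parts.append("No more swaps needed.")
--     return ''.join(parts)
-- ===== Notes on version B (the rewrite author's own statement) =====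
-- stated objective: simpler
-- what changed: B replaces A's sentinel-value selection (writing 10**10 over a full-length array, recording min indices, then a second formatting pass) by a shrinking-list simulation that pops the front element into the first-minimum slot and emits each swap line immediately, with no sentinel, no index list and no second pass.
import Mathlib
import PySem

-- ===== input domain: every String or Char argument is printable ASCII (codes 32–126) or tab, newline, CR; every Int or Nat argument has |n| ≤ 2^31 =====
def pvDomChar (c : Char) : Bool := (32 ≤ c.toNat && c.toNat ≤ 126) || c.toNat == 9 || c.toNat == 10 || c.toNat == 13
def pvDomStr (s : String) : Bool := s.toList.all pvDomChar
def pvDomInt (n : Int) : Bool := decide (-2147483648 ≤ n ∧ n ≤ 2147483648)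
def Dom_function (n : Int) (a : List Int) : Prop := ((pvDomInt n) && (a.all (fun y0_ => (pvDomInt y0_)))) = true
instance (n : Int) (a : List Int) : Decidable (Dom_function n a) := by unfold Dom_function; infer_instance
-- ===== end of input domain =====

-- B replaces A's sentinel-overwrite selection and second formatting pass by a shrinking-list
-- simulation emitting swap lines inline (simpler).  A mutates its argument list in place, B does
-- not: the equivalence proved here is about the return value.

-- ===== PORT A =====
-- the inner `for i, v in enumerate(a)` loop, state (minimum, index), pos = enumerate counter
def pvScanA (minimum index pos : Int) : List Int → Int × Int
  | [] => (minimum, index)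
  | v :: t => if minimum > v then pvScanA v pos (pos + 1) t else pvScanA minimum index (pos + 1) t

-- the outer `for _ in range(n)` loop, state (a, res)
def pvLoopA : Nat → List Int → List Int → List Int × List Int
  | 0, a, res => (a, res)
  | fuel + 1, a, res =>
    let mi := pvScanA (10 ^ 10) (-1) 0 a                                -- minimum, index
    let old := PySem.List.pyGetD a (res.length : Int) 0                 -- a[len(res)] (in range under Pre_)
    let a1 := PySem.List.pySetD a mi.2 old                              -- a[index] = a[len(res)]
    let a2 := PySem.List.pySetD a1 (res.length : Int) (10 ^ 10)         -- a[len(res)] = 10 ** 10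
    pvLoopA fuel a2 (res ++ [mi.2])                                     -- res.append(index)

def function (n : Int) (a : List Int) : String :=
  PySem.Str.join ""
    (((PySem.List.enumerate (pvLoopA n.toNat a []).2 0).foldl
      (fun (acc : List String) p =>
        if p.1 ≠ p.2 then
          acc ++ ["Swap elements at indices " ++ PySem.Int.toStr (1 + min p.2 p.1) ++ " and "
                   ++ PySem.Int.toStr (1 + max p.2 p.1) ++ ".\n"]
        else acc) [])
      ++ ["No more swaps needed."])

-- ===== PORT B =====
-- the `for k in range(n)` loop of Source B, state (tail, parts)
def pvLoopB : Nat → Int → List Int → List String → List Int × List String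
  | 0, _, tail, parts => (tail, parts)
  | fuel + 1, k, tail, parts =>
    match PySem.List.min? tail (fun y => y) with
    | none => (tail, parts)                       -- Python: min([]) raises ValueError; outside Pre_
    | some m =>
      let j : Nat := (PySem.List.index? tail m).getD 0   -- tail.index(min(tail))
      let head := tail.headD 0                           -- head = tail.pop(0) (tail nonempty here)
      let tail' := tail.tail
      if j ≠ 0 then
        pvLoopB fuel (k + 1) (tail'.set (j - 1) head)    -- tail[j-1] = head
          (parts ++ ["Swap elements at indices " ++ PySem.Int.toStr (k + 1) ++ " and "
                      ++ PySem.Int.toStr (k + (j : Int) + 1) ++ ".\n"])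
      else
        pvLoopB fuel (k + 1) tail' parts

def function_alt (n : Int) (a : List Int) : String :=
  PySem.Str.join "" ((pvLoopB n.toNat 0 a []).2 ++ ["No more swaps needed."])

-- ===== PRECONDITION & SPEC =====
-- A raises IndexError as soon as the selection loop has overwritten the whole list, i.e. whenever
-- n > len(a) (B raises ValueError there too); Pre_ admits exactly the inputs on which A returns.
def Pre_function (n : Int) (a : List Int) : Prop := n ≤ (a.length : Int)
instance (n : Int) (a : List Int) : Decidable (Pre_function n a) := by
  unfold Pre_function; infer_instance

def pvWitness_function : Int × List Int := (4, [3, 1, 2, 1])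

def Spec_function (n : Int) (a : List Int) (out : String) : Prop := out = function_alt n a
instance (n : Int) (a : List Int) (out : String) : Decidable (Spec_function n a out) := by
  unfold Spec_function; infer_instance

-- ===== CLAIM (what is proved, stated in full; the proofs are below) =====
def Claim_equal_function : Prop :=
  ∀ (n : Int) (a : List Int), Dom_function n a → Pre_function n a →
    Spec_function n a (function n a)

-- ===== LEMMAS AND PROOFS =====

-- one rendered entry of A's final formatting loop
def pvRender (p : Int × Int) : List String :=
  if p.1 ≠ p.2 then
    ["Swap elements at indices " ++ PySem.Int.toStr (1 + min p.2 p.1) ++ " and "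
      ++ PySem.Int.toStr (1 + max p.2 p.1) ++ ".\n"]
  else []

def pvRenderRes (res : List Int) : List String :=
  (PySem.List.enumerate res 0).flatMap pvRender

theorem pvFoldl_render (l : List (Int × Int)) (acc : List String) :
    l.foldl (fun (acc : List String) p =>
      if p.1 ≠ p.2 then
        acc ++ ["Swap elements at indices " ++ PySem.Int.toStr (1 + min p.2 p.1) ++ " and "
                 ++ PySem.Int.toStr (1 + max p.2 p.1) ++ ".\n"]
      else acc) acc = acc ++ l.flatMap pvRender := by
  induction l generalizing acc with
  | nil => simp
  | cons p t ih =>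
    simp only [List.foldl_cons, List.flatMap_cons, ih, pvRender]
    split <;> simp

-- the scan skips a prefix of sentinels
theorem pvScanA_replicate (k : Nat) (t : List Int) (idx pos : Int) :
    pvScanA (10 ^ 10) idx pos (List.replicate k (10 ^ 10) ++ t)
      = pvScanA (10 ^ 10) idx (pos + k) t := by
  induction k generalizing pos with
  | zero => simp
  | succ k ih =>
    simp only [List.replicate_succ, List.cons_append, pvScanA]
    rw [if_neg (by omega)]
    rw [ih]
    congr 1
    push_cast
    ring

-- the scan is first-argmin
theorem pvScanA_spec (t : List Int) (cur idx pos : Int) :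
    pvScanA cur idx pos t =
      (PySem.List.min? t (fun y => y)).elim (cur, idx)
        (fun m => if cur ≤ m then (cur, idx)
          else (m, pos + (((PySem.List.index? t m).getD 0 : Nat) : Int))) := by
  induction t generalizing cur idx pos with
  | nil => simp [pvScanA, PySem.List.min?]
  | cons v t ih =>
    have hmem : ∀ m, PySem.List.min? t (fun y => y) = some m → m ∈ t := by
      intro m hm; exact PySem.List.min?_mem hm
    rcases ht : PySem.List.min? t (fun y => y) with _ | mt
    · -- t = []
      have ht' : t = [] := (PySem.List.min?_eq_none_iff _ _).1 ht
      subst ht'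
      simp only [pvScanA]
      rcases lt_or_ge v cur with h | h
      · rw [if_pos (by omega)]
        simp [PySem.List.min?_id_cons, if_neg (by omega : ¬ cur ≤ v)]
      · rw [if_neg (by omega)]
        simp [PySem.List.min?_id_cons, if_pos h]
    · -- min? t = some mt
      have hmt_mem : mt ∈ t := hmem mt ht
      have hfold : PySem.List.min? (v :: t) (fun y => y) = some (min v mt) := by
        rw [PySem.List.min?_id_cons]
        rcases t with _ | ⟨h, t'⟩
        · simp [PySem.List.min?] at ht
        · rw [PySem.List.min?_id_cons] at ht
          have : t'.foldl min h = mt := by simpa using ht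
          subst this
          congr 1
          simp only [List.foldl_cons]
          exact List.foldl_assoc
      rw [hfold]
      simp only [pvScanA, Option.elim_some]
      rcases lt_or_ge v cur with h | h
      · -- branch taken: minimum := v, index := pos
        rw [if_pos (by omega), ih, ht]
        simp only [Option.elim_some]
        by_cases hv : v ≤ mt
        · rw [if_pos hv, if_neg (by omega : ¬ cur ≤ min v mt)]
          rw [min_eq_left hv, PySem.List.index?_cons_self]
          simp
        · rw [if_neg (by omega), if_neg (by omega : ¬ cur ≤ min v mt)]
          rw [min_eq_right (by omega : mt ≤ v)]
          have hne : v ≠ mt := by omega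
          rw [PySem.List.index?_cons_of_ne _ hne]
          rcases hj : PySem.List.index? t mt with _ | jj
          · exact absurd ((PySem.List.index?_eq_none_iff _ _).1 hj) (not_not_intro hmt_mem)
          · simp [hj]
            ring
      · -- branch not taken
        rw [if_neg (by omega), ih, ht]
        simp only [Option.elim_some]
        by_cases hv : cur ≤ mt
        · rw [if_pos hv, if_pos (by omega : cur ≤ min v mt)]
        · rw [if_neg (by omega), if_neg (by omega : ¬ cur ≤ min v mt)]
          rw [min_eq_right (by omega : mt ≤ v)]
          have hne : v ≠ mt := by omega
          rw [PySem.List.index?_cons_of_ne _ hne]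
          rcases hj : PySem.List.index? t mt with _ | jj
          · exact absurd ((PySem.List.index?_eq_none_iff _ _).1 hj) (not_not_intro hmt_mem)
          · simp [hj]
            ring

-- set at k + j across a sentinel prefix of length k
theorem pvSet_append (k : Nat) (xs : List Int) (j : Nat) (v b : Int) :
    (List.replicate k b ++ xs).set (k + j) v = List.replicate k b ++ xs.set j v := by
  induction k with
  | zero => simp
  | succ k ih =>
    simp only [List.replicate_succ, List.cons_append]
    have : k + 1 + j = (k + j) + 1 := by omega
    rw [this, List.set_cons_succ, ih]

theorem pvGetD_append (k : Nat) (h : Int) (t : List Int) (b d : Int) :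
    (List.replicate k b ++ h :: t).getD k d = h := by
  simp [List.getD]

-- the main loop correspondence
theorem pvMain (fuel : Nat) :
    ∀ (k : Nat) (tail res : List Int) (parts : List String),
      (∀ v ∈ tail, v ≤ 2147483648) →
      fuel ≤ tail.length →
      res.length = k →
      parts = pvRenderRes res →
      (pvLoopB fuel (k : Int) tail parts).2
        = pvRenderRes ((pvLoopA fuel (List.replicate k (10 ^ 10) ++ tail) res).2) := by
  induction fuel with
  | zero => intro k tail res parts _ _ _ hparts; simpa [pvLoopA, pvLoopB] using hparts
  | succ fuel ih =>
    intro k tail res parts hbound hlen hk hparts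
    rcases tail with _ | ⟨h, t⟩
    · simp at hlen
    -- the shared selection step
    rcases hm : PySem.List.min? (h :: t) (fun y => y) with _ | m
    · simp [PySem.List.min?_eq_none_iff] at hm
    have hmmem : m ∈ h :: t := PySem.List.min?_mem hm
    have hmlt : m < 10 ^ 10 := by have := hbound m hmmem; omega
    obtain ⟨j, hj⟩ : ∃ j, PySem.List.index? (h :: t) m = some j := by
      rcases hx : PySem.List.index? (h :: t) m with _ | j
      · exact absurd ((PySem.List.index?_eq_none_iff _ _).1 hx) (not_not_intro hmmem)
      · exact ⟨j, rfl⟩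
    have hjlen : j < (h :: t).length := by
      obtain ⟨hjl, -, -⟩ := PySem.List.getElem_of_index?_eq_some hj
      exact hjl
    have hscan :
        pvScanA (10 ^ 10) (-1) 0 (List.replicate k (10 ^ 10) ++ h :: t)
          = (m, (k : Int) + (j : Int)) := by
      rw [pvScanA_replicate, pvScanA_spec, hm]
      have hnle : ¬ (10 : Int) ^ 10 ≤ m := by omega
      simp only [Option.elim_some, hnle, if_false, hj, Option.getD_some, Prod.mk.injEq, true_and]
      omega
    -- A's step
    have hAstep :
        pvLoopA (fuel + 1) (List.replicate k (10 ^ 10) ++ h :: t) res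
          = pvLoopA fuel
              (List.replicate (k + 1) (10 ^ 10) ++ (if j = 0 then t else t.set (j - 1) h))
              (res ++ [(k : Int) + (j : Int)]) := by
      simp only [pvLoopA, hscan]
      congr 1
      -- the array after the two assignments
      have hold : PySem.List.pyGetD (List.replicate k (10 ^ 10) ++ h :: t) (res.length : Int) 0 = h := by
        rw [hk, PySem.List.pyGetD_natCast, pvGetD_append]
      rw [hold]
      have hset1 : PySem.List.pySetD (List.replicate k (10 ^ 10) ++ h :: t) ((k : Int) + (j : Int)) h
          = List.replicate k (10 ^ 10) ++ (h :: t).set j h := by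
        have : ((k : Int) + (j : Int)) = ((k + j : Nat) : Int) := by push_cast; ring
        rw [this, PySem.List.pySetD_natCast, pvSet_append]
      rw [hset1, hk]
      have hset2 : PySem.List.pySetD (List.replicate k (10 ^ 10) ++ (h :: t).set j h) (k : Int) (10 ^ 10)
          = List.replicate k (10 ^ 10) ++ ((h :: t).set j h).set 0 (10 ^ 10) := by
        have : (k : Int) = ((k + 0 : Nat) : Int) := by push_cast; ring
        rw [this, PySem.List.pySetD_natCast]
        have : (k + 0 : Nat) = k + 0 := rfl
        rw [pvSet_append]
      rw [hset2]
      rcases j with _ | jj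
      · simp [List.replicate_succ' (n := k), List.append_assoc]
      · simp only [List.set_cons_succ, List.set_cons_zero, if_neg (Nat.succ_ne_zero jj)]
        simp [List.replicate_succ' (n := k), List.append_assoc]
    -- B's step
    have hBstep :
        pvLoopB (fuel + 1) (k : Int) (h :: t) parts
          = pvLoopB fuel ((k : Int) + 1) (if j = 0 then t else t.set (j - 1) h)
              (parts ++ (if j = 0 then [] else
                ["Swap elements at indices " ++ PySem.Int.toStr ((k : Int) + 1) ++ " and "
                  ++ PySem.Int.toStr ((k : Int) + (j : Int) + 1) ++ ".\n"])) := by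
      simp only [pvLoopB, hm, hj]
      rcases j with _ | jj
      · simp
      · simp
    rw [hAstep, hBstep]
    have hcast : ((k : Int) + 1) = ((k + 1 : Nat) : Int) := by push_cast; ring
    rw [hcast]
    apply ih
    · intro v hv
      rcases j with _ | jj
      · exact hbound v (List.mem_cons_of_mem _ (by simpa using hv))
      · simp only [if_neg (Nat.succ_ne_zero jj)] at hv
        rcases List.mem_or_eq_of_mem_set hv with hv' | hv'
        · exact hbound v (List.mem_cons_of_mem _ hv')
        · subst hv'; exact hbound v List.mem_cons_self
    · rcases j with _ | jj <;> simp at hlen ⊢ <;> omega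
    · simp [hk]
    · -- parts invariant
      rw [hparts]
      unfold pvRenderRes
      rw [PySem.List.enumerate_append]
      simp only [List.flatMap_append, hk]
      congr 1
      simp only [PySem.List.enumerate_cons, PySem.List.enumerate_nil, List.flatMap_cons,
        List.flatMap_nil, List.append_nil, pvRender]
      rcases j with _ | jj
      · simp
      · have hne : (0 : Int) + (k : Int) ≠ (k : Int) + ((jj + 1 : Nat) : Int) := by push_cast; omega
        rw [if_pos hne]
        have h1 : min ((k : Int) + ((jj + 1 : Nat) : Int)) (0 + (k : Int)) = 0 + (k : Int) := by
          push_cast; omega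
        have h2 : max ((k : Int) + ((jj + 1 : Nat) : Int)) (0 + (k : Int))
            = (k : Int) + ((jj + 1 : Nat) : Int) := by push_cast; omega
        rw [h1, h2]
        have h3 : (1 : Int) + (0 + (k : Int)) = (k : Int) + 1 := by ring
        have h4 : (1 : Int) + ((k : Int) + ((jj + 1 : Nat) : Int))
            = (k : Int) + ((jj + 1 : Nat) : Int) + 1 := by ring
        rw [h3, h4, if_neg (by omega : ¬ (jj + 1 = 0))]
        push_cast
        rfl

-- ===== VERDICT (by name: the statement is the Claim_ definition above) =====
theorem function_spec : Claim_equal_function := by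
  intro n a hdom hpre
  unfold Spec_function function function_alt
  have hbound : ∀ v ∈ a, v ≤ 2147483648 := by
    intro v hv
    unfold Dom_function at hdom
    simp only [Bool.and_eq_true, List.all_eq_true] at hdom
    have := hdom.2 v hv
    simp [pvDomInt] at this
    omega
  have hlen : n.toNat ≤ a.length := Int.toNat_le.2 hpre
  have hmain := pvMain n.toNat 0 a [] [] hbound hlen rfl (by simp [pvRenderRes])
  simp only [Nat.cast_zero, List.replicate_zero, List.nil_append] at hmain
  rw [pvFoldl_render, hmain]
  simp [pvRenderRes]
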